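-- pv_equiv track=rewrite | github.com/vul337/PrIntFuzz | scripts/python/utils/create_fake_devices.py | edit_pci_reg
-- ===== SOURCE A (Python) =====
-- def edit_pci_reg(fake_device_content, driver_info):
--     reg_info = []
--     cnt = 0
--     for reg_value in driver_info['PCI Reg']:
--         width = reg_value[0]
--         reg_value = reg_value[1]
--         if width == 2:
--             reg_info.append(f'pcibase->buf[{cnt}] = {hex(reg_value)};')
--             cnt += 1
--         elif width == 4:
--             reg_info.append(f'pcibase->buf[{cnt}] = {hex(reg_value >> 8)};')
--             cnt += 1
--             reg_info.append(f'pcibase->buf[{cnt}] = {hex(reg_value & 0xff)};')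
--             cnt += 1
--         elif width == 8:
--             reg_info.append(f'pcibase->buf[{cnt}] = {hex(reg_value >> 24)};')
--             cnt += 1
--             reg_info.append(f'pcibase->buf[{cnt}] = {hex((reg_value >> 16) & 0xff)};')
--             cnt += 1
--             reg_info.append(f'pcibase->buf[{cnt}] = {hex((reg_value >> 8) & 0xff)};')
--             cnt += 1
--             reg_info.append(f'pcibase->buf[{cnt}] = {hex(reg_value & 0xff)};')
--             cnt += 1
--     fake_device_content = fake_device_content.replace("#PROBECNT#", str(cnt));
--
--     return fake_device_content.replace('#REGVALUE', '\n\t'.join(reg_info))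
-- ===== SOURCE B (Python) =====
-- def _split(value, nbytes):
--     # big-endian split into nbytes bytes; the leading byte keeps any higher bits unmasked
--     if nbytes <= 1:
--         return [value]
--     return _split(value >> 8, nbytes - 1) + [value & 0xff]
--
-- def edit_pci_reg(fake_device_content, driver_info):
--     byts = []
--     for reg in driver_info['PCI Reg']:
--         if reg[0] in (2, 4, 8):
--             byts += _split(reg[1], reg[0] // 2)
--     lines = '\n\t'.join(f'pcibase->buf[{i}] = {hex(b)};' for i, b in enumerate(byts))
--     return fake_device_content.replace("#PROBECNT#", str(len(byts))).replace('#REGVALUE', lines)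
-- ===== Notes on version B (the rewrite author's own statement) =====
-- stated objective: alternative
-- what changed: B first flattens all registers into one byte list via a recursive big-endian splitter _split(value, width//2) (no shift/mask chain, no running counter), then formats the lines in a separate pass with enumerate and takes cnt = len(bytes), instead of A's single pass with a cnt accumulator and three hardcoded width branches.
import Mathlib
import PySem

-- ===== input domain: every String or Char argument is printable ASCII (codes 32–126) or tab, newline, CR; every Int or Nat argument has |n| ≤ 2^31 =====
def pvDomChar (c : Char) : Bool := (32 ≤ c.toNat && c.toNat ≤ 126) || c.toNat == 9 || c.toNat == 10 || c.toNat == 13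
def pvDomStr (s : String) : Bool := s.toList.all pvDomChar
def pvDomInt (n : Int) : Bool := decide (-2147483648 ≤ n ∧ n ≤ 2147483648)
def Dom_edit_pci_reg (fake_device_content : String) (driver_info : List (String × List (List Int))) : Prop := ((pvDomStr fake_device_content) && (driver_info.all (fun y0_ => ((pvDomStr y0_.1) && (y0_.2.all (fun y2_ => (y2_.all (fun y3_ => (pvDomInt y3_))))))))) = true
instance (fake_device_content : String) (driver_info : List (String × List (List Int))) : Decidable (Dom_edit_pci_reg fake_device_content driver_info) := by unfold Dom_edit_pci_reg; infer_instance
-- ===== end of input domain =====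

-- B flattens registers into one byte list via a recursive big-endian splitter, then formats with enumerate; return-value equivalence with A, stated on Pre_ (A raises on missing 'PCI Reg' or short entries).

-- ===== PORT A =====
-- exact port of Python's hex(): lowercase digits, '0x' prefix, '-0x' for negatives, hex(0) = "0x0"
def pvHex (n : Int) : String :=
  (if n < 0 then "-0x" else "0x") ++ String.ofList (Nat.toDigits 16 n.natAbs)

-- the shared f-string  f'pcibase->buf[{cnt}] = {hex(v)};'
def pvLine (cnt v : Int) : String :=
  "pcibase->buf[" ++ PySem.Int.toStr cnt ++ "] = " ++ pvHex v ++ ";"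

-- one iteration of A's loop body; state = (reg_info, cnt)
def pvStepA (acc : List String × Int) (reg : List Int) : List String × Int :=
  let width := PySem.List.pyGetD reg 0 0
  let v := PySem.List.pyGetD reg 1 0
  if width = 2 then
    (acc.1 ++ [pvLine acc.2 v], acc.2 + 1)
  else if width = 4 then
    let a1 := (acc.1 ++ [pvLine acc.2 (v >>> (8 : Nat))], acc.2 + 1)
    (a1.1 ++ [pvLine a1.2 (PySem.Int.band v 255)], a1.2 + 1)
  else if width = 8 then
    let a1 := (acc.1 ++ [pvLine acc.2 (v >>> (24 : Nat))], acc.2 + 1)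
    let a2 := (a1.1 ++ [pvLine a1.2 (PySem.Int.band (v >>> (16 : Nat)) 255)], a1.2 + 1)
    let a3 := (a2.1 ++ [pvLine a2.2 (PySem.Int.band (v >>> (8 : Nat)) 255)], a2.2 + 1)
    (a3.1 ++ [pvLine a3.2 (PySem.Int.band v 255)], a3.2 + 1)
  else acc

def edit_pci_reg (fake_device_content : String) (driver_info : List (String × List (List Int))) : String :=
  let regs := ((PySem.Dict.ofList driver_info).get? "PCI Reg").getD []
  let r := regs.foldl pvStepA ([], 0)
  PySem.Str.replace (PySem.Str.replace fake_device_content "#PROBECNT#" (PySem.Int.toStr r.2))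
    "#REGVALUE" (PySem.Str.join "\n\t" r.1)

-- ===== PORT B =====
-- B's recursive splitter: big-endian bytes, leading byte left unmasked
def pvSplit (value : Int) (nbytes : Int) : List Int :=
  if nbytes ≤ 1 then [value]
  else pvSplit (value >>> (8 : Nat)) (nbytes - 1) ++ [PySem.Int.band value 255]
termination_by nbytes.toNat
decreasing_by omega

-- one iteration of B's byte-collecting loop
def pvStepB (bs : List Int) (reg : List Int) : List Int :=
  let w := PySem.List.pyGetD reg 0 0
  if w = 2 ∨ w = 4 ∨ w = 8 then
    bs ++ pvSplit (PySem.List.pyGetD reg 1 0) (PySem.Int.floordiv w 2)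
  else bs

def edit_pci_reg_alt (fake_device_content : String) (driver_info : List (String × List (List Int))) : String :=
  let regs := ((PySem.Dict.ofList driver_info).get? "PCI Reg").getD []
  let byts := regs.foldl pvStepB []
  let lines := PySem.Str.join "\n\t" ((PySem.List.enumerate byts).map (fun p => pvLine p.1 p.2))
  PySem.Str.replace (PySem.Str.replace fake_device_content "#PROBECNT#" (PySem.Int.toStr (byts.length : Int)))
    "#REGVALUE" lines

-- ===== PRECONDITION & SPEC =====
-- Pre_ excludes exactly the inputs where Python A raises: a missing 'PCI Reg' key (KeyError)
-- or a register entry with fewer than 2 elements (IndexError on reg_value[0]/reg_value[1]).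
def Pre_edit_pci_reg (fake_device_content : String) (driver_info : List (String × List (List Int))) : Prop :=
  (((PySem.Dict.ofList driver_info).get? "PCI Reg").isSome = true) ∧
  (∀ r ∈ ((PySem.Dict.ofList driver_info).get? "PCI Reg").getD [], 2 ≤ r.length)
instance (fake_device_content : String) (driver_info : List (String × List (List Int))) : Decidable (Pre_edit_pci_reg fake_device_content driver_info) := by unfold Pre_edit_pci_reg; infer_instance

def pvWitness_edit_pci_reg : String × (List (String × List (List Int))) :=
  ("buf #PROBECNT# / #REGVALUE", [("PCI Reg", [[2, 5], [4, 300]])])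

def Spec_edit_pci_reg (fake_device_content : String) (driver_info : List (String × List (List Int))) (out : String) : Prop := out = edit_pci_reg_alt fake_device_content driver_info
instance (fake_device_content : String) (driver_info : List (String × List (List Int))) (out : String) : Decidable (Spec_edit_pci_reg fake_device_content driver_info out) := by unfold Spec_edit_pci_reg; infer_instance

-- ===== CLAIM (what is proved, stated in full; the proofs are below) =====
def Claim_equal_edit_pci_reg : Prop := ∀ (fake_device_content : String) (driver_info : List (String × List (List Int))), Dom_edit_pci_reg fake_device_content driver_info → Pre_edit_pci_reg fake_device_content driver_info → Spec_edit_pci_reg fake_device_content driver_info (edit_pci_reg fake_device_content driver_info)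

-- ===== LEMMAS AND PROOFS =====

def pvLines (bs : List Int) : List String :=
  (PySem.List.enumerate bs).map (fun p => pvLine p.1 p.2)

theorem pvLines_append (bs ys : List Int) :
    pvLines (bs ++ ys) = pvLines bs ++ (PySem.List.enumerate ys (bs.length : Int)).map (fun p => pvLine p.1 p.2) := by
  simp [pvLines, PySem.List.enumerate_append]

theorem pvSplit_two (v : Int) : pvSplit v 2 = [v >>> (8 : Nat), PySem.Int.band v 255] := by
  rw [pvSplit]; norm_num; rw [pvSplit]; norm_num

theorem pvSplit_four (v : Int) :
    pvSplit v 4 = [v >>> (24 : Nat), PySem.Int.band (v >>> (16 : Nat)) 255,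
                   PySem.Int.band (v >>> (8 : Nat)) 255, PySem.Int.band v 255] := by
  rw [pvSplit]; norm_num
  rw [pvSplit]; norm_num
  simp [pvSplit_two, Int.shiftRight_eq_div_pow, Int.ediv_ediv_of_nonneg]

-- each A step maintains the "lines are the enumeration of B's bytes, cnt their count" invariant
theorem pvStep_eq (bs : List Int) (reg : List Int) :
    pvStepA (pvLines bs, (bs.length : Int)) reg = (pvLines (pvStepB bs reg), ((pvStepB bs reg).length : Int)) := by
  unfold pvStepA pvStepB
  by_cases h2 : PySem.List.pyGetD reg 0 0 = 2
  · simp [h2, pvSplit, pvLines_append, PySem.List.enumerate_cons, PySem.List.enumerate_nil]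
  · by_cases h4 : PySem.List.pyGetD reg 0 0 = 4
    · simp [h4, pvSplit_two, pvLines_append, PySem.List.enumerate_cons, PySem.List.enumerate_nil]
      omega
    · by_cases h8 : PySem.List.pyGetD reg 0 0 = 8
      · simp [h8, pvSplit_four, pvLines_append, PySem.List.enumerate_cons, PySem.List.enumerate_nil]
        omega
      · simp [h2, h4, h8]

theorem pvLoop_eq (regs : List (List Int)) (bs : List Int) :
    regs.foldl pvStepA (pvLines bs, (bs.length : Int)) =
      (pvLines (regs.foldl pvStepB bs), ((regs.foldl pvStepB bs).length : Int)) := by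
  induction regs generalizing bs with
  | nil => rfl
  | cons r rs ih => simp only [List.foldl_cons, pvStep_eq]; exact ih _

-- ===== VERDICT (by name: the statement is the Claim_ definition above) =====
theorem edit_pci_reg_spec : Claim_equal_edit_pci_reg := by
  intro fc di _dom _pre
  unfold Spec_edit_pci_reg edit_pci_reg edit_pci_reg_alt
  have := pvLoop_eq (((PySem.Dict.ofList di).get? "PCI Reg").getD []) []
  simp only [pvLines, PySem.List.enumerate_nil, List.map_nil, List.length_nil, Int.natCast_zero] at this
  dsimp only
  rw [this]
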